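-- pv_equiv track=rewrite | github.com/Mikolaj-Brzoskowski/Studies | basics of python/lab_8/zad_7.py | check
-- ===== SOURCE A (Python) =====
-- def check(el, lista):
--     if lista == []:
--         return True
--     if el >= lista[0]:
--         lista.pop(0)
--         return check(el,lista)
--     elif el < lista[0]:
--         return False
-- ===== SOURCE B (Python) =====
-- def check(el, lista):
--     while lista and el >= lista[0]:
--         lista.pop(0)
--     return lista == []
-- ===== Notes on version B (the rewrite author's own statement) =====
-- stated objective: idiomatic
-- what changed: Replaced the self-recursive pop-and-recurse with an iterative while loop that pops leading elements <= el and then tests emptiness; the front-popping mutation of the argument is preserved.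
import Mathlib
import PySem

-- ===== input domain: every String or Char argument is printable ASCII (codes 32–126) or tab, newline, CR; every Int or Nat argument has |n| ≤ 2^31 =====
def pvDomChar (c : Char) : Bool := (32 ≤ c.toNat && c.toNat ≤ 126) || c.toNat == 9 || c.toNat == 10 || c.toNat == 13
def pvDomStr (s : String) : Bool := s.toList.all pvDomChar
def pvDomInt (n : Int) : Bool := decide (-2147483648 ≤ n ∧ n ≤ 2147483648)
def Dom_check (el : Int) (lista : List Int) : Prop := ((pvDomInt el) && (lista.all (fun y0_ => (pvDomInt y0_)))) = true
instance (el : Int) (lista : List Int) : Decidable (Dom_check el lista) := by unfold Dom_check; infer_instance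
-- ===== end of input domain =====

-- B replaces A's pop-and-recurse recursion with an iterative while loop that pops
-- leading elements ≤ el and then tests emptiness (same front-popping mutation of the
-- argument in Python; the equivalence proved here is about the return value).

-- ===== PORT A =====
-- A: recursion — empty list → True; el ≥ head → pop and recurse; el < head → False.
def check (el : Int) (lista : List Int) : Bool :=
  match lista with
  | [] => true
  | x :: rest =>
    if el ≥ x then check el rest
    else if el < x then false
    else false  -- unreachable: trichotomy; Python would return None here, but el ≥ x ∨ el < x always

-- ===== PORT B =====
-- B's while loop: returns the residual list after popping leading elements ≤ el.
def checkAltLoop (el : Int) (lista : List Int) : List Int :=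
  match lista with
  | [] => []
  | x :: rest => if el ≥ x then checkAltLoop el rest else x :: rest

def check_alt (el : Int) (lista : List Int) : Bool :=
  checkAltLoop el lista == []

-- ===== PRECONDITION & SPEC =====
def Spec_check (el : Int) (lista : List Int) (out : Bool) : Prop := out = check_alt el lista
instance (el : Int) (lista : List Int) (out : Bool) : Decidable (Spec_check el lista out) := by unfold Spec_check; infer_instance

-- ===== CLAIM (what is proved, stated in full; the proofs are below) =====
def Claim_equal_check : Prop := ∀ (el : Int) (lista : List Int), Dom_check el lista → Spec_check el lista (check el lista)

-- ===== LEMMAS AND PROOFS =====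
theorem check_eq_alt (el : Int) (lista : List Int) : check el lista = check_alt el lista := by
  induction lista with
  | nil => rfl
  | cons x rest ih =>
    simp only [check, check_alt, checkAltLoop]
    split_ifs with h1 h2
    · exact ih
    · simp
    · omega

-- ===== VERDICT (by name: the statement is the Claim_ definition above) =====
theorem check_spec : Claim_equal_check := by
  intro el lista _
  exact check_eq_alt el lista
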